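-- pv_equiv track=rewrite | github.com/circlezero/Algorithm | programmers/hash003.py | solution
-- ===== SOURCE A (Python) =====
-- def solution(clothes):
--     clothDict = {}
--     clothTypes = []
--     for cloth in clothes:
--         clothTypes.append(cloth[1])
--     clothTypes = list(set(clothTypes))
--
--     for i in clothTypes:
--         clothDict[i] = []
--
--     for cloth in clothes:
--         clothDict[cloth[1]].append(cloth[0])
--
--     clothTypeNum = len(clothDict)
--     clothNumArr = []
--     for i in clothDict:
--         clothNumArr.append(len(clothDict[i]))
--
--     res = 1
--     for i in clothNumArr:
--         res = res * (i + 1)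
--     return res-1
-- ===== SOURCE B (Python) =====
-- def solution(clothes):
--     res = 1
--     cur = None
--     count = 0
--     for cloth in sorted(clothes, key=lambda c: c[1]):
--         k = cloth[1]
--         if cur is not None and k == cur:
--             count += 1
--         else:
--             if cur is not None:
--                 res *= count + 1
--             cur = k
--             count = 1
--     if cur is not None:
--         res *= count + 1
--     return res - 1
-- ===== Notes on version B (the rewrite author's own statement) =====
-- stated objective: alternative
-- what changed: Replaced A's four-pass hash grouping (set of categories, dict of buckets, list of bucket sizes, product loop) by sort-then-scan: sort clothes by category and make one pass multiplying the result by (run length + 1) at each category change.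
import Mathlib
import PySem

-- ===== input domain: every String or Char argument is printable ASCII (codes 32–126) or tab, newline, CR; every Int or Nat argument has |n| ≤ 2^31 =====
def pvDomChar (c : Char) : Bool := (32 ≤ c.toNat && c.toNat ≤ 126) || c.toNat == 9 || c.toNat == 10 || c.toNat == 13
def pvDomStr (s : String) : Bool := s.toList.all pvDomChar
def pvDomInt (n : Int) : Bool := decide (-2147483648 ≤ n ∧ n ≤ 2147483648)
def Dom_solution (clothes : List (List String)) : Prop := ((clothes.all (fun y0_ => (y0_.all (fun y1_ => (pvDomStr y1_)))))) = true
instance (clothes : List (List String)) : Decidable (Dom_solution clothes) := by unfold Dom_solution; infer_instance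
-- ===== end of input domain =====

-- B replaces A's four-pass dict/bucket grouping by sort-by-category then a single run-length scan (different traversal shape, similar cost); return values proved equal wherever every cloth has an index-1 entry.


-- ===== PORT A =====
def solution (clothes : List (List String)) : Int :=
  let clothTypes : List String :=
    clothes.foldl (fun acc cloth => acc ++ [PySem.List.pyGetD cloth 1 ""]) []
  let clothTypes2 : PySem.Set String := PySem.Set.ofList clothTypes
  let clothDict0 : PySem.Dict String (List String) :=
    clothTypes2.foldl (fun d i => d.insert i []) PySem.Dict.empty
  let clothDict : PySem.Dict String (List String) :=
    clothes.foldl (fun d cloth =>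
      d.modify (PySem.List.pyGetD cloth 1 "") []
        (fun l => l ++ [PySem.List.pyGetD cloth 0 ""])) clothDict0
  let clothNumArr : List Int :=
    clothDict.keys.foldl (fun acc i => acc ++ [((clothDict.getD i []).length : Int)]) []
  let res : Int := clothNumArr.foldl (fun r i => r * (i + 1)) 1
  res - 1

-- ===== PORT B =====
-- one iteration of B's loop body; state is (cur, count, res)
def solStep (st : Option String × Int × Int) (k : String) : Option String × Int × Int :=
  match st with
  | (some c, count, res) => if k = c then (some c, count + 1, res) else (some k, 1, res * (count + 1))
  | (none, _, res) => (some k, 1, res)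

def solution_alt (clothes : List (List String)) : Int :=
  let sortedClothes := PySem.List.sorted clothes (fun c => PySem.List.pyGetD c 1 "") false
  let st := sortedClothes.foldl
    (fun st cloth => solStep st (PySem.List.pyGetD cloth 1 "")) ((none : Option String), (0 : Int), (1 : Int))
  match st with
  | (none, _, res) => res - 1
  | (some _, count, res) => res * (count + 1) - 1

-- ===== PRECONDITION & SPEC =====
-- Pre_ holds exactly where Python A returns: each cloth needs an index-1 entry (A raises IndexError on cloth[1] for shorter inner lists, and B raises there too).
def Pre_solution (clothes : List (List String)) : Prop := ∀ c ∈ clothes, 2 ≤ c.length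
instance (clothes : List (List String)) : Decidable (Pre_solution clothes) := by unfold Pre_solution; infer_instance
def pvWitness_solution : List (List String) := [["blue", "hat"], ["red", "hat"], ["x", "pants"]]
def Spec_solution (clothes : List (List String)) (out : Int) : Prop := out = solution_alt clothes
instance (clothes : List (List String)) (out : Int) : Decidable (Spec_solution clothes out) := by unfold Spec_solution; infer_instance

-- ===== CLAIM (what is proved, stated in full; the proofs are below) =====
def Claim_equal_solution : Prop := ∀ (clothes : List (List String)), Dom_solution clothes → Pre_solution clothes → Spec_solution clothes (solution clothes)

-- ===== LEMMAS AND PROOFS =====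

-- the quantity both programs compute (before the final -1): over the distinct categories of ks, the product of (count + 1)
def prodCounts (ks : List String) : Int :=
  ((PySem.Set.ofList ks).map (fun t => (ks.count t : Int) + 1)).prod

-- finishing step of B's scan (close the last open run)
def solFin (st : Option String × Int × Int) : Int :=
  match st with
  | (none, _, res) => res
  | (some _, count, res) => res * (count + 1)

theorem set_update_of_subset (s : PySem.Set String) (l : List String) (h : ∀ x ∈ l, x ∈ s) : PySem.Set.update s l = s := by
  induction l generalizing s with
  | nil => rfl
  | cons x t ih =>
      have hx : PySem.Set.add s x = s := by
        simp [PySem.Set.add]; exact h x (by simp)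
      show PySem.Set.update (PySem.Set.add s x) t = s
      rw [hx]; exact ih s (fun y hy => h y (List.mem_cons_of_mem _ hy))

theorem foldl_mul_succ (l : List Int) (a : Int) :
    l.foldl (fun r i => r * (i + 1)) a = a * (l.map (fun i => i + 1)).prod := by
  induction l generalizing a with
  | nil => simp
  | cons x t ih => simp [List.foldl_cons, ih, mul_assoc]

-- A computes prodCounts of the list of categories, minus 1
theorem solution_eq_prodCounts (clothes : List (List String)) :
    solution clothes = prodCounts (clothes.map (fun c => PySem.List.pyGetD c 1 "")) - 1 := by
  unfold solution
  have h1 : clothes.foldl (fun acc cloth => acc ++ [PySem.List.pyGetD cloth 1 ""]) [] =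
      clothes.map (fun c => PySem.List.pyGetD c 1 "") := by
    rw [PySem.List.foldl_append_singleton_eq_map (fun c => PySem.List.pyGetD c 1 "") clothes ([] : List String)]
    simp
  rw [h1]
  dsimp only
  set ks : List String := clothes.map (fun c => PySem.List.pyGetD c 1 "") with hks
  set T : PySem.Set String := PySem.Set.ofList ks with hT
  set d0 : PySem.Dict String (List String) :=
    T.foldl (fun d i => d.insert i []) PySem.Dict.empty with hd0
  set d1 : PySem.Dict String (List String) :=
    clothes.foldl (fun d cloth =>
      d.modify (PySem.List.pyGetD cloth 1 "") [] (fun l => l ++ [PySem.List.pyGetD cloth 0 ""])) d0 with hd1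
  have hkeys0 : d0.keys = T := by
    rw [hd0, PySem.Dict.keys_foldl_insert T (fun _ _ => []) _]
    show PySem.Set.update PySem.Dict.empty.keys T = T
    rw [PySem.Dict.keys_empty]
    show PySem.Set.ofList T = T
    exact PySem.Set.ofList_ofList ks
  have hgetD0 : ∀ t, d0.getD t [] = [] := by
    intro t
    rw [hd0]
    induction T using List.reverseRecOn with
    | nil => simp [PySem.Dict.getD_empty]
    | append_singleton xs x ih =>
        rw [List.foldl_append]; simp [PySem.Dict.getD_insert]; intro h; exact ih
  have hkeys1 : d1.keys = T := by
    rw [hd1, PySem.Dict.keys_foldl_modify_key clothes (fun c => PySem.List.pyGetD c 1 "") _ _, hkeys0]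
    exact set_update_of_subset T ks (fun x hx => (PySem.Set.mem_ofList ks x).2 (hks ▸ hx))
  have hgetD1 : ∀ t, ((d1.getD t []).length : Int) = (ks.count t : Int) := by
    intro t
    have hfold : d1 = (clothes.map (fun c => (PySem.List.pyGetD c 1 "", PySem.List.pyGetD c 0 ""))).foldl
        (fun d p => d.modify p.1 [] (fun l => l ++ [p.2])) d0 := by
      rw [hd1, List.foldl_map]
    rw [hfold, PySem.Dict.getD_foldl_modify_append, hgetD0]
    simp [← List.countP_eq_length_filter, List.countP_map, hks, List.count, Function.comp_def]
  have h2 : d1.keys.foldl (fun acc i => acc ++ [((d1.getD i []).length : Int)]) []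
      = T.map (fun t => (ks.count t : Int)) := by
    rw [hkeys1,
      PySem.List.foldl_append_singleton_eq_map (fun i => ((d1.getD i []).length : Int)) T ([] : List Int),
      List.nil_append]
    exact List.map_congr_left (fun t _ => hgetD1 t)
  rw [h2, foldl_mul_succ, List.map_map]
  show 1 * (T.map (fun t => (ks.count t : Int) + 1)).prod - 1 = prodCounts ks - 1
  rw [one_mul, prodCounts]

-- B's scan: the res component is linear in the initial res
theorem res_factor : ∀ (l : List String) (cur : Option String) (c r : Int),
    l.foldl solStep (cur, c, r)
      = ((l.foldl solStep (cur, c, 1)).1, (l.foldl solStep (cur, c, 1)).2.1,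
         r * (l.foldl solStep (cur, c, 1)).2.2)
  | [], cur, c, r => by simp
  | x :: t, cur, c, r => by
    cases cur with
    | none =>
        simp only [List.foldl_cons, solStep]
        rw [res_factor t (some x) 1 r]
    | some cc =>
        by_cases h : x = cc
        · simp only [List.foldl_cons, solStep, if_pos h]
          rw [res_factor t (some cc) (c + 1) r]
        · simp only [List.foldl_cons, solStep, if_neg h]
          rw [res_factor t (some x) 1 (r * (c + 1)), res_factor t (some x) 1 (1 * (c + 1))]
          simp [mul_assoc]

-- B's scan over a run of equal categories just counts
theorem run_fold (l : List String) (k : String) (c r : Int) (h : ∀ x ∈ l, x = k) :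
    l.foldl solStep (some k, c, r) = (some k, c + l.length, r) := by
  induction l generalizing c with
  | nil => simp
  | cons x t ih =>
      have hx : x = k := h x (by simp)
      simp only [List.foldl_cons, solStep, hx, if_true]
      rw [ih (c + 1) (fun y hy => h y (List.mem_cons_of_mem _ hy))]
      simp; ring

theorem fin_res_factor (l : List String) (cur : Option String) (c r : Int) :
    solFin (l.foldl solStep (cur, c, r)) = r * solFin (l.foldl solStep (cur, c, 1)) := by
  rw [res_factor l cur c r]
  rcases hX : l.foldl solStep (cur, c, 1) with ⟨a, b, q⟩
  cases a <;> simp [solFin] <;> ring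

-- prodCounts may be read off any duplicate-free enumeration of the categories
theorem prodCounts_eq_of (l D : List String) (hD : D.Nodup) (hmem : ∀ x, x ∈ D ↔ x ∈ l) :
    prodCounts l = (D.map (fun t => (l.count t : Int) + 1)).prod := by
  have hp : (PySem.Set.ofList l).Perm D := by
    rw [List.perm_ext_iff_of_nodup (PySem.Set.nodup_ofList l) hD]
    intro a; rw [PySem.Set.mem_ofList, hmem]
  exact (hp.map _).prod_eq

-- the heart of B: on a sorted category list, the run-length scan computes prodCounts
theorem scan_sorted : ∀ (n : Nat) (l : List String), l.length ≤ n → l.Pairwise (· ≤ ·) →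
    solFin (l.foldl solStep ((none : Option String), (0 : Int), (1 : Int))) = prodCounts l
  | n, [], _, _ => by simp [solFin, prodCounts, PySem.Set.ofList]
  | Nat.succ n, k :: t, hlen, hp => by
    have hkt : ∀ x ∈ t, k ≤ x := (List.pairwise_cons.1 hp).1
    have hpt : t.Pairwise (· ≤ ·) := (List.pairwise_cons.1 hp).2
    set run := t.takeWhile (fun x => x == k) with hrun
    set rest := t.dropWhile (fun x => x == k) with hrest
    have hsplit : run ++ rest = t := List.takeWhile_append_dropWhile
    have hrunk : ∀ x ∈ run, x = k := by
      intro x hx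
      have := List.mem_takeWhile_imp hx
      simpa using this
    have hstep : (k :: t).foldl solStep ((none : Option String), (0 : Int), (1 : Int))
        = rest.foldl solStep (some k, 1 + (run.length : Int), 1) := by
      simp only [List.foldl_cons, solStep]
      rw [← hsplit, List.foldl_append, run_fold run k 1 1 hrunk]
    rw [hstep]
    rcases hr : rest with _ | ⟨h, t'⟩
    · -- a single category
      simp only [solFin]
      have htr : t = run := by rw [← hsplit, hr, List.append_nil]
      have hallk : ∀ x ∈ k :: t, x = k := by
        intro x hx; rcases List.mem_cons.1 hx with rfl | hx
        · rfl
        · exact hrunk x (htr ▸ hx)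
      have hD : prodCounts (k :: t) = (((k :: t).count k : Int) + 1) := by
        rw [prodCounts_eq_of (k :: t) [k] (by simp) ?_]
        · simp
        · intro x
          constructor
          · intro hx; simp at hx; simp [hx]
          · intro hx; simp [hallk x hx]
      rw [hD]
      have : (k :: t).count k = (k :: t).length := by
        rw [List.count_eq_length]
        intro b hb; exact (hallk b hb).symm
      rw [this, htr]
      simp; ring
    · -- the first run is followed by a strictly larger category h
      have hh : ¬ (h == k) = true := by
        have := List.head?_dropWhile_not (fun x => x == k) t
        rw [← hrest, hr] at this
        simpa using this
      have hhk : h ≠ k := by simpa using hh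
      have hhmem : h ∈ t := by
        rw [← hsplit, hr]; simp
      have hkh : k < h := lt_of_le_of_ne (hkt h hhmem) (Ne.symm hhk)
      have hrest_sub : rest.Sublist t := by rw [hrest]; exact List.dropWhile_sublist _
      have hprest : rest.Pairwise (· ≤ ·) := hpt.sublist (hr ▸ hrest_sub)
      have hknotin : k ∉ rest := by
        rw [hr]; intro hx
        rcases List.mem_cons.1 hx with rfl | hx
        · exact hhk rfl
        · have : h ≤ k := (List.pairwise_cons.1 (hr ▸ hprest)).1 k hx
          exact absurd (lt_of_lt_of_le hkh this) (lt_irrefl k)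
      have hlen' : rest.length ≤ n := by
        have h1 : rest.length ≤ t.length := hrest_sub.length_le
        have h2 : t.length ≤ n := Nat.le_of_succ_le_succ hlen
        omega
      have hIH := scan_sorted n rest (hr ▸ hlen') (hr ▸ hprest)
      rw [hr] at hIH
      simp only [List.foldl_cons, solStep, if_neg hhk, one_mul] at hIH ⊢
      rw [fin_res_factor t' (some h) 1 (1 + (run.length : Int) + 1)]
      rw [hIH]
      have hkS : k ∉ PySem.Set.ofList (h :: t') := by
        rw [PySem.Set.mem_ofList]; rw [hr] at hknotin; exact hknotin
      have hDnodup : (k :: PySem.Set.ofList (h :: t')).Nodup :=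
        List.nodup_cons.2 ⟨hkS, PySem.Set.nodup_ofList _⟩
      have hDmem : ∀ x, x ∈ k :: PySem.Set.ofList (h :: t') ↔ x ∈ k :: t := by
        intro x
        rw [List.mem_cons, List.mem_cons, PySem.Set.mem_ofList, ← hr]
        constructor
        · rintro (rfl | hx)
          · exact Or.inl rfl
          · exact Or.inr (hsplit ▸ List.mem_append.2 (Or.inr hx))
        · rintro (rfl | hx)
          · exact Or.inl rfl
          · rw [← hsplit] at hx
            rcases List.mem_append.1 hx with hx | hx
            · exact Or.inl (hrunk x hx)
            · exact Or.inr hx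
      rw [prodCounts_eq_of (k :: t) _ hDnodup hDmem, List.map_cons, List.prod_cons]
      have hck : ((k :: t).count k : Int) = (run.length : Int) + 1 := by
        rw [List.count_cons_self, ← hsplit, List.count_append]
        have h1 : run.count k = run.length := List.count_eq_length.2 (fun b hb => (hrunk b hb).symm)
        have h2 : rest.count k = 0 := List.count_eq_zero.2 hknotin
        rw [h1, h2]
        push_cast; ring
      have hrestprod : ((PySem.Set.ofList (h :: t')).map (fun x => ((k :: t).count x : Int) + 1)).prod
          = prodCounts (h :: t') := by
        unfold prodCounts
        congr 1
        refine List.map_congr_left (fun x hx => ?_)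
        have hxr : x ∈ rest := by rw [hr]; exact (PySem.Set.mem_ofList _ _).1 hx
        have hxk : x ≠ k := fun hxe => hknotin (hxe ▸ hxr)
        have hxrun : x ∉ run := fun hxm => hxk (hrunk x hxm)
        have e1 : (k :: t).count x = t.count x := by
          rw [List.count_cons]
          have : ¬ k = x := fun he => hxk he.symm
          simp [this]
        rw [e1, ← hsplit, List.count_append, List.count_eq_zero.2 hxrun, hr]
        simp
      rw [hck, hrestprod]
      ring
  | Nat.zero, k :: t, hlen, _ => by simp at hlen

theorem final_match (st : Option String × Int × Int) :
    (match st with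
     | (none, _, res) => res - 1
     | (some _, count, res) => res * (count + 1) - 1) = solFin st - 1 := by
  rcases st with ⟨a, b, c⟩
  cases a <;> rfl

-- B computes prodCounts of the sorted category list, minus 1
theorem solution_alt_eq_prodCounts (clothes : List (List String)) :
    solution_alt clothes
      = prodCounts ((PySem.List.sorted clothes (fun c => PySem.List.pyGetD c 1 "") false).map
          (fun c => PySem.List.pyGetD c 1 "")) - 1 := by
  unfold solution_alt
  dsimp only
  rw [final_match, ← List.foldl_map]
  rw [scan_sorted ((PySem.List.sorted clothes (fun c => PySem.List.pyGetD c 1 "") false).map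
      (fun c => PySem.List.pyGetD c 1 "")).length _ le_rfl
      (PySem.List.sorted_map_key_pairwise clothes _)]

-- prodCounts is invariant under permutation of the category list
theorem prodCounts_perm {ks ls : List String} (h : ks.Perm ls) : prodCounts ks = prodCounts ls := by
  unfold prodCounts
  have hp : (PySem.Set.ofList ks).Perm (PySem.Set.ofList ls) := by
    rw [List.perm_ext_iff_of_nodup (PySem.Set.nodup_ofList ks) (PySem.Set.nodup_ofList ls)]
    intro a; simp [PySem.Set.mem_ofList, h.mem_iff]
  calc ((PySem.Set.ofList ks).map (fun t => (ks.count t : Int) + 1)).prod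
      = ((PySem.Set.ofList ls).map (fun t => (ks.count t : Int) + 1)).prod := (hp.map _).prod_eq
    _ = ((PySem.Set.ofList ls).map (fun t => (ls.count t : Int) + 1)).prod := by
        congr 1; exact List.map_congr_left (fun t _ => by rw [h.count_eq])

-- ===== VERDICT (by name: the statement is the Claim_ definition above) =====
theorem solution_spec : Claim_equal_solution := by
  intro clothes _ _
  show solution clothes = solution_alt clothes
  rw [solution_eq_prodCounts, solution_alt_eq_prodCounts]
  exact congrArg (· - 1) (prodCounts_perm ((PySem.List.sorted_perm clothes _ false).map _).symm)
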